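-- pv_equiv track=rewrite | github.com/canhbn2003/DATN_PC | PC_AI/system/store/views.py | _parse_description_to_table
-- ===== SOURCE A (Python) =====
-- def _parse_description_to_table(description):
--     """
--     Parse description format: key: value. key2: value2.
--     Returns list of tuples: [(key1, value1), (key2, value2), ...]
--     """
--     if not description:
--         return []
--
--     # Split by '.' to get rows
--     rows = description.split('.')
--     table_data = []
--
--     for row in rows:
--         row = row.strip()
--         if not row:
--             continue
--
--         # Split by ':' to get key and value
--         if ':' in row:
--             key, value = row.split(':', 1)
--             table_data.append({
--                 'label': key.strip(),
--                 'value': value.strip()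
--             })
--
--     return table_data
-- ===== SOURCE B (Python) =====
-- def _parse_description_to_table(description):
--     """Single left-to-right character scan with a (key, buffer) state machine instead of nested splits."""
--     table = []
--     key = None   # chars of the current segment before its first ':' (None = no ':' seen yet)
--     buf = []
--     for ch in (description or ''):
--         if ch == '.':
--             if key is not None:
--                 table.append({'label': ''.join(key).strip(),
--                               'value': ''.join(buf).strip()})
--             key, buf = None, []
--         elif ch == ':' and key is None:
--             key, buf = buf, []
--         else:
--             buf.append(ch)
--     if key is not None:
--         table.append({'label': ''.join(key).strip(), 'value': ''.join(buf).strip()})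
--     return table
-- ===== Notes on version B (the rewrite author's own statement) =====
-- stated objective: alternative
-- what changed: Replaced A's split-into-period-separated-rows pass followed by a per-row strip/colon-test/split-once pass with a single left-to-right character scan that maintains a (key, buffer) state machine and emits a row whenever a segment containing a colon ends.
import Mathlib
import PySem

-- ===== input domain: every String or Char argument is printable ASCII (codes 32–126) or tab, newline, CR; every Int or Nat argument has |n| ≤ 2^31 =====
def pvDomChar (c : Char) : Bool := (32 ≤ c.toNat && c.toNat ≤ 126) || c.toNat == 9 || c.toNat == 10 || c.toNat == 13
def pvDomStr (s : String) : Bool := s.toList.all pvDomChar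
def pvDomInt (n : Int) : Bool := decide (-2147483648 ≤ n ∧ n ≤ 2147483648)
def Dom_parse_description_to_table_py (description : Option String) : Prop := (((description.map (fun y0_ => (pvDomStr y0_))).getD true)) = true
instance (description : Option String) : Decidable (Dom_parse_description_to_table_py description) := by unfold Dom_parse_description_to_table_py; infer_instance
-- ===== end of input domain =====

-- B replaces A's split-into-rows-then-split-each-row passes by a single left-to-right
-- character scan with a (key?, buffer) state machine; objective: alternative single-pass structure.

-- ===== PORT A =====
-- A's loop body: row = row.strip(); skip empty; if ':' in row: key, value = row.split(':', 1); append dict.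
-- (strings are handled on .toList via PySem.Chars, the List Char definitions behind PySem.Str)
def pvRowA (acc : List (List (String × String))) (row : List Char) :
    List (List (String × String)) :=
  let row := PySem.Chars.strip row
  if row = [] then acc
  else if PySem.Chars.isIn [':'] row then
    match PySem.Chars.splitOnMax row [':'] 1 with
    | [key, value] =>
        acc ++ [[("label", String.ofList (PySem.Chars.strip key)),
                 ("value", String.ofList (PySem.Chars.strip value))]]
    | _ => acc          -- unreachable: split(':', 1) with ':' in row yields exactly two pieces
  else acc

def parse_description_to_table_py (description : Option String) :
    List (List (String × String)) :=
  match description with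
  | none => []                                -- `if not description`
  | some s =>
    if s = "" then []
    else (PySem.Chars.splitOn s.toList ['.']).foldl pvRowA []

-- ===== PORT B =====
def pvFlush (key? : Option (List Char)) (buf : List Char) :
    List (List (String × String)) :=
  match key? with
  | none => []
  | some k => [[("label", String.ofList (PySem.Chars.strip k)),
                ("value", String.ofList (PySem.Chars.strip buf))]]

def pvScanB : List Char → List (List (String × String)) → Option (List Char) → List Char →
    List (List (String × String))
  | [], table, key?, buf => table ++ pvFlush key? buf
  | c :: rest, table, key?, buf =>
    if c = '.' then pvScanB rest (table ++ pvFlush key? buf) none []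
    else
      match key? with
      | none => if c = ':' then pvScanB rest table (some buf) []
                else pvScanB rest table none (buf ++ [c])
      | some k => pvScanB rest table (some k) (buf ++ [c])

def parse_description_to_table_py_alt (description : Option String) :
    List (List (String × String)) :=
  pvScanB (description.getD "").toList [] none []

-- ===== PRECONDITION & SPEC =====
def Spec_parse_description_to_table_py (description : Option String) (out : List (List (String × String))) : Prop := out = parse_description_to_table_py_alt description
instance (description : Option String) (out : List (List (String × String))) : Decidable (Spec_parse_description_to_table_py description out) := by unfold Spec_parse_description_to_table_py; infer_instance

-- ===== CLAIM (what is proved, stated in full; the proofs are below) =====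
def Claim_equal_parse_description_to_table_py : Prop := ∀ (description : Option String), Dom_parse_description_to_table_py description → Spec_parse_description_to_table_py description (parse_description_to_table_py description)

-- ===== LEMMAS AND PROOFS =====

-- A's loop body as "append a pure function of the row"
def pvG (row : List Char) : List (List (String × String)) :=
  if PySem.Chars.strip row = [] then []
  else if PySem.Chars.isIn [':'] (PySem.Chars.strip row) then
    match PySem.Chars.splitOnMax (PySem.Chars.strip row) [':'] 1 with
    | [key, value] =>
        [[("label", String.ofList (PySem.Chars.strip key)),
          ("value", String.ofList (PySem.Chars.strip value))]]
    | _ => []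
  else []

theorem pvRowA_eq (acc : List (List (String × String))) (row : List Char) :
    pvRowA acc row = acc ++ pvG row := by
  show (if PySem.Chars.strip row = [] then acc
    else if PySem.Chars.isIn [':'] (PySem.Chars.strip row) then
      match PySem.Chars.splitOnMax (PySem.Chars.strip row) [':'] 1 with
      | [key, value] =>
          acc ++ [[("label", String.ofList (PySem.Chars.strip key)),
                   ("value", String.ofList (PySem.Chars.strip value))]]
      | _ => acc
    else acc) = _
  show _ = acc ++ (if PySem.Chars.strip row = [] then []
    else if PySem.Chars.isIn [':'] (PySem.Chars.strip row) then
      match PySem.Chars.splitOnMax (PySem.Chars.strip row) [':'] 1 with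
      | [key, value] =>
          [[("label", String.ofList (PySem.Chars.strip key)),
            ("value", String.ofList (PySem.Chars.strip value))]]
      | _ => []
    else [])
  split_ifs <;> (try simp) <;> (split <;> simp)

theorem foldl_pvRowA (rows : List (List Char)) (acc : List (List (String × String))) :
    rows.foldl pvRowA acc = acc ++ rows.flatMap pvG := by
  induction rows generalizing acc with
  | nil => simp
  | cons r t ih => simp [pvRowA_eq, ih]

theorem go_spec (fuel : Nat) :
    ∀ (l cur : List Char) (acc : List (List Char)), l.length < fuel →
    PySem.Chars.splitOn.go ['.'] fuel l cur acc
      = acc.reverse ++ (List.splitOnP (· == '.') l).modifyHead (cur.reverse ++ ·) := by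
  induction fuel with
  | zero => intro l cur acc h; omega
  | succ n ih =>
    intro l cur acc h
    cases l with
    | nil => simp [PySem.Chars.splitOn.go, List.splitOnP_nil]
    | cons c rest =>
      obtain ⟨a, t, hat⟩ : ∃ a t, List.splitOnP (· == '.') rest = a :: t := by
        rcases e : List.splitOnP (· == '.') rest with _ | ⟨a, t⟩
        · exact absurd e (List.splitOnP_ne_nil _ _)
        · exact ⟨a, t, rfl⟩
      by_cases hc : c = '.'
      · subst hc
        rw [PySem.Chars.splitOn.go]
        simp [List.splitOnP_cons, ih rest [] _ (by simpa using Nat.lt_of_succ_lt_succ h), hat]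
      · rw [PySem.Chars.splitOn.go]
        simp [List.isPrefixOf, hc, Ne.symm hc, List.splitOnP_cons,
          ih rest (c :: cur) _ (by simpa using Nat.lt_of_succ_lt_succ h), hat]

theorem splitOn_eq (cs : List Char) :
    PySem.Chars.splitOn cs ['.'] = List.splitOnP (· == '.') cs := by
  obtain ⟨a, t, hat⟩ : ∃ a t, List.splitOnP (· == '.') cs = a :: t := by
    rcases e : List.splitOnP (· == '.') cs with _ | ⟨a, t⟩
    · exact absurd e (List.splitOnP_ne_nil _ _)
    · exact ⟨a, t, rfl⟩
  rw [PySem.Chars.splitOn, go_spec _ _ _ _ (by omega), hat]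
  simp

theorem go_zero (fuel : Nat) (l : List Char) (acc : List (List Char)) :
    PySem.Chars.splitOnMax.go [':'] fuel 0 l [] acc = (l :: acc).reverse := by
  cases fuel with
  | zero => rw [PySem.Chars.splitOnMax.go]; simp
  | succ n => cases l <;> (rw [PySem.Chars.splitOnMax.go.eq_def]; simp)

theorem go_one (fuel : Nat) :
    ∀ (k v cur : List Char) (acc : List (List Char)), ':' ∉ k →
    (k ++ ':' :: v).length < fuel →
    PySem.Chars.splitOnMax.go [':'] fuel 1 (k ++ ':' :: v) cur acc
      = acc.reverse ++ [cur.reverse ++ k, v] := by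
  induction fuel with
  | zero => intro k v cur acc hk h; omega
  | succ n ih =>
    intro k v cur acc hk h
    cases k with
    | nil =>
      rw [PySem.Chars.splitOnMax.go.eq_def]
      simp [go_zero]
    | cons c k' =>
      have hc : c ≠ ':' := fun e => hk (by simp [e])
      rw [PySem.Chars.splitOnMax.go.eq_def]
      simp only [List.cons_append]
      simp [List.isPrefixOf, Ne.symm hc,
        ih k' v (c :: cur) acc (fun m => hk (List.mem_cons_of_mem _ m)) (by simp at h ⊢; omega)]

theorem splitOnMax_one (k v : List Char) (hk : ':' ∉ k) :
    PySem.Chars.splitOnMax (k ++ ':' :: v) [':'] 1 = [k, v] := by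
  rw [PySem.Chars.splitOnMax]
  norm_num
  rw [go_one _ _ _ _ _ hk (by simp)]
  simp

theorem dropWhile_idem (p : Char → Bool) (l : List Char) :
    List.dropWhile p (List.dropWhile p l) = List.dropWhile p l := by
  induction l with
  | nil => simp
  | cons c t ih =>
    by_cases hc : p c
    · simp [List.dropWhile_cons, hc, ih]
    · simp [List.dropWhile_cons, hc]

theorem lstrip_append (k v : List Char) :
    PySem.Chars.lstrip (k ++ ':' :: v) = PySem.Chars.lstrip k ++ ':' :: v := by
  unfold PySem.Chars.lstrip
  rw [List.dropWhile_append]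
  by_cases h : (List.dropWhile PySem.Chars.isspace k).isEmpty <;>
    simp [h, List.dropWhile_cons, show PySem.Chars.isspace ':' = false from rfl] <;>
    simp_all

theorem rstrip_append (k v : List Char) :
    PySem.Chars.rstrip (k ++ ':' :: v) = k ++ ':' :: PySem.Chars.rstrip v := by
  unfold PySem.Chars.rstrip
  rw [show (k ++ ':' :: v).reverse = v.reverse ++ ':' :: k.reverse by simp,
    List.dropWhile_append]
  by_cases h : (List.dropWhile PySem.Chars.isspace v.reverse).isEmpty <;>
    simp [h, List.dropWhile_cons, show PySem.Chars.isspace ':' = false from rfl] <;>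
    simp_all

theorem strip_append (k v : List Char) :
    PySem.Chars.strip (k ++ ':' :: v)
      = PySem.Chars.lstrip k ++ ':' :: PySem.Chars.rstrip v := by
  rw [PySem.Chars.strip, lstrip_append, rstrip_append]

theorem strip_lstrip (k : List Char) :
    PySem.Chars.strip (PySem.Chars.lstrip k) = PySem.Chars.strip k := by
  rw [PySem.Chars.strip, PySem.Chars.strip, PySem.Chars.lstrip, PySem.Chars.lstrip,
    dropWhile_idem]

theorem rstrip_cons_neg (c : Char) (t : List Char) (hc : PySem.Chars.isspace c = false) :
    PySem.Chars.rstrip (c :: t) = c :: PySem.Chars.rstrip t := by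
  unfold PySem.Chars.rstrip
  rw [show (c :: t).reverse = t.reverse ++ [c] by simp, List.dropWhile_append]
  by_cases h : (List.dropWhile PySem.Chars.isspace t.reverse).isEmpty <;>
    simp [h, List.dropWhile_cons, hc] <;> simp_all

theorem rstrip_cons_pos (c : Char) (t : List Char) (hc : PySem.Chars.isspace c = true) :
    PySem.Chars.rstrip (c :: t)
      = if PySem.Chars.rstrip t = [] then [] else c :: PySem.Chars.rstrip t := by
  unfold PySem.Chars.rstrip
  rw [show (c :: t).reverse = t.reverse ++ [c] by simp, List.dropWhile_append]
  by_cases h : (List.dropWhile PySem.Chars.isspace t.reverse).isEmpty <;>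
    simp [h, List.dropWhile_cons, hc] <;> simp_all

theorem rstrip_eq_nil_iff (t : List Char) :
    PySem.Chars.rstrip t = [] ↔ ∀ c ∈ t, PySem.Chars.isspace c := by
  unfold PySem.Chars.rstrip
  rw [List.reverse_eq_nil_iff, List.dropWhile_eq_nil_iff]
  simp

theorem lstrip_eq_nil_iff (t : List Char) :
    PySem.Chars.lstrip t = [] ↔ ∀ c ∈ t, PySem.Chars.isspace c := by
  unfold PySem.Chars.lstrip
  rw [List.dropWhile_eq_nil_iff]

theorem lstrip_rstrip_comm (v : List Char) :
    PySem.Chars.lstrip (PySem.Chars.rstrip v)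
      = PySem.Chars.rstrip (PySem.Chars.lstrip v) := by
  induction v with
  | nil => rfl
  | cons c t ih =>
    by_cases hc : PySem.Chars.isspace c
    · rw [rstrip_cons_pos c t hc]
      by_cases ht : PySem.Chars.rstrip t = []
      · have : PySem.Chars.lstrip t = [] :=
          (lstrip_eq_nil_iff t).2 ((rstrip_eq_nil_iff t).1 ht)
        simp [ht, PySem.Chars.lstrip, List.dropWhile_cons, hc]
        rw [show List.dropWhile PySem.Chars.isspace t = PySem.Chars.lstrip t from rfl, this]
        rfl
      · rw [if_neg ht]
        have : PySem.Chars.lstrip (c :: PySem.Chars.rstrip t)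
            = PySem.Chars.lstrip (PySem.Chars.rstrip t) := by
          simp [PySem.Chars.lstrip, List.dropWhile_cons, hc]
        rw [this, ih]
        simp [PySem.Chars.lstrip, List.dropWhile_cons, hc]
    · have hc' : PySem.Chars.isspace c = false := by simpa using hc
      rw [rstrip_cons_neg c t hc']
      simp [PySem.Chars.lstrip, List.dropWhile_cons, hc']
      rw [rstrip_cons_neg c t hc']

theorem rstrip_idem (v : List Char) :
    PySem.Chars.rstrip (PySem.Chars.rstrip v) = PySem.Chars.rstrip v := by
  unfold PySem.Chars.rstrip
  rw [List.reverse_reverse, dropWhile_idem]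

theorem strip_rstrip (v : List Char) :
    PySem.Chars.strip (PySem.Chars.rstrip v) = PySem.Chars.strip v := by
  rw [PySem.Chars.strip, PySem.Chars.strip, lstrip_rstrip_comm, rstrip_idem]

theorem strip_sublist (l : List Char) : List.Sublist (PySem.Chars.strip l) l := by
  have h1 : List.Sublist (PySem.Chars.lstrip l) l := List.dropWhile_sublist _
  have h2 : List.Sublist (PySem.Chars.rstrip (PySem.Chars.lstrip l)) (PySem.Chars.lstrip l) := by
    unfold PySem.Chars.rstrip
    have := List.dropWhile_sublist (p := PySem.Chars.isspace)
      (l := (PySem.Chars.lstrip l).reverse)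
    simpa using this.reverse
  exact h2.trans h1

theorem isIn_colon_of_mem (r : List Char) (h : ':' ∈ r) :
    PySem.Chars.isIn [':'] r = true := by
  rw [PySem.Chars.isIn_iff_infix]
  obtain ⟨s, t, rfl⟩ := List.append_of_mem h
  exact ⟨s, t, by simp⟩

theorem isIn_colon_of_not_mem (r : List Char) (h : ':' ∉ r) :
    PySem.Chars.isIn [':'] r = false := by
  rw [PySem.Chars.isIn_eq_false_iff]
  intro hin
  exact h (hin.subset (by simp))

theorem splitOnP_no (p : Char → Bool) (l : List Char) (h : ∀ c ∈ l, ¬ p c) :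
    List.splitOnP p l = [l] := by
  induction l with
  | nil => simp [List.splitOnP_nil]
  | cons c t ih =>
    rw [List.splitOnP_cons, if_neg (by simpa using h c (by simp)),
      ih (fun x hx => h x (by simp [hx]))]
    rfl

theorem splitOnP_pre (pre : List Char) (h : '.' ∉ pre) :
    ∀ l : List Char, List.splitOnP (· == '.') (pre ++ l)
      = (List.splitOnP (· == '.') l).modifyHead (pre ++ ·) := by
  induction pre with
  | nil =>
    intro l
    obtain ⟨a, t, hat⟩ : ∃ a t, List.splitOnP (· == '.') l = a :: t := by
      rcases e : List.splitOnP (· == '.') l with _ | ⟨a, t⟩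
      · exact absurd e (List.splitOnP_ne_nil _ _)
      · exact ⟨a, t, rfl⟩
    simp [hat]
  | cons c pre' ih =>
    intro l
    have hc : (c == '.') = false := by
      simp only [List.mem_cons, not_or] at h; simpa using fun e => h.1 e.symm
    obtain ⟨a, t, hat⟩ : ∃ a t, List.splitOnP (· == '.') (pre' ++ l) = a :: t := by
      rcases e : List.splitOnP (· == '.') (pre' ++ l) with _ | ⟨a, t⟩
      · exact absurd e (List.splitOnP_ne_nil _ _)
      · exact ⟨a, t, rfl⟩
    obtain ⟨a', t', hat'⟩ : ∃ a' t', List.splitOnP (· == '.') l = a' :: t' := by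
      rcases e : List.splitOnP (· == '.') l with _ | ⟨a', t'⟩
      · exact absurd e (List.splitOnP_ne_nil _ _)
      · exact ⟨a', t', rfl⟩
    have h' : '.' ∉ pre' := fun m => h (by simp [m])
    rw [List.cons_append, List.splitOnP_cons, if_neg (by simp [hc]), ih h' l, hat']
    simp

def pvRecon : Option (List Char) → List Char → List Char
  | none, buf => buf
  | some k, buf => k ++ ':' :: buf

def pvInv : Option (List Char) → List Char → Prop
  | none, buf => ':' ∉ buf ∧ '.' ∉ buf
  | some k, buf => ':' ∉ k ∧ '.' ∉ k ∧ '.' ∉ buf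

theorem g_recon (key? : Option (List Char)) (buf : List Char) (h : pvInv key? buf) :
    pvG (pvRecon key? buf) = pvFlush key? buf := by
  cases key? with
  | none =>
    simp only [pvRecon, pvFlush, pvG]
    by_cases he : PySem.Chars.strip buf = []
    · simp [he]
    · have hm : ':' ∉ PySem.Chars.strip buf := fun m => h.1 ((strip_sublist buf).subset m)
      simp [he, isIn_colon_of_not_mem _ hm]
  | some k =>
    obtain ⟨hk1, hk2, hb⟩ := h
    simp only [pvRecon, pvG, pvFlush]
    rw [strip_append]
    rw [if_neg (by simp), if_pos (isIn_colon_of_mem _ (by simp))]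
    have hkl : ':' ∉ PySem.Chars.lstrip k :=
      fun m => hk1 ((List.dropWhile_sublist _).subset m)
    rw [splitOnMax_one _ _ hkl]
    simp [strip_lstrip, strip_rstrip]

theorem no_dot_recon (key? : Option (List Char)) (buf : List Char) (h : pvInv key? buf) :
    '.' ∉ pvRecon key? buf := by
  cases key? with
  | none => exact h.2
  | some k =>
    obtain ⟨_, hk2, hb⟩ := h
    simp only [pvRecon, List.mem_append, List.mem_cons, not_or]
    exact ⟨hk2, by decide, hb⟩

theorem scan_eq (cs : List Char) : ∀ (table : List (List (String × String)))
    (key? : Option (List Char)) (buf : List Char), pvInv key? buf →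
    pvScanB cs table key? buf
      = table ++ (List.splitOnP (· == '.') (pvRecon key? buf ++ cs)).flatMap pvG := by
  induction cs with
  | nil =>
    intro table key? buf h
    rw [List.append_nil, splitOnP_no _ _ (fun c hc e => no_dot_recon key? buf h (by
      simp at e; exact e ▸ hc))]
    simp [pvScanB, g_recon key? buf h]
  | cons c rest ih =>
    intro table key? buf h
    by_cases hc : c = '.'
    · subst hc
      rw [show pvScanB ('.' :: rest) table key? buf
          = pvScanB rest (table ++ pvFlush key? buf) none [] by simp [pvScanB]]
      rw [ih _ none [] (by exact ⟨by simp, by simp⟩),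
        show pvRecon none [] ++ rest = rest from rfl,
        splitOnP_pre _ (no_dot_recon key? buf h), List.splitOnP_cons]
      simp [g_recon key? buf h]
    · cases key? with
      | none =>
        by_cases hcol : c = ':'
        · subst hcol
          rw [show pvScanB (':' :: rest) table none buf
              = pvScanB rest table (some buf) [] by simp [pvScanB, hc]]
          rw [ih _ (some buf) [] ⟨h.1, h.2, by simp⟩,
            show pvRecon (some buf) [] ++ rest = pvRecon none buf ++ ':' :: rest by
              simp [pvRecon]]
        · rw [show pvScanB (c :: rest) table none buf
              = pvScanB rest table none (buf ++ [c]) by simp [pvScanB, hc, hcol]]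
          rw [ih _ none (buf ++ [c]) (by
            refine ⟨fun m => ?_, fun m => ?_⟩
            · rcases List.mem_append.1 m with m1 | m1
              · exact h.1 m1
              · simp at m1; exact hcol m1.symm
            · rcases List.mem_append.1 m with m1 | m1
              · exact h.2 m1
              · simp at m1; exact hc m1.symm)]
          rw [show pvRecon none (buf ++ [c]) ++ rest = pvRecon none buf ++ c :: rest by
            simp [pvRecon]]
      | some k =>
        rw [show pvScanB (c :: rest) table (some k) buf
            = pvScanB rest table (some k) (buf ++ [c]) by simp [pvScanB, hc]]
        rw [ih _ (some k) (buf ++ [c]) (by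
          refine ⟨h.1, h.2.1, fun m => ?_⟩
          rcases List.mem_append.1 m with m1 | m1
          · exact h.2.2 m1
          · simp at m1; exact hc m1.symm)]
        rw [show pvRecon (some k) (buf ++ [c]) ++ rest = pvRecon (some k) buf ++ c :: rest by
          simp [pvRecon]]

-- ===== VERDICT (by name: the statement is the Claim_ definition above) =====
theorem parse_description_to_table_py_spec : Claim_equal_parse_description_to_table_py := by
  intro description _
  unfold Spec_parse_description_to_table_py parse_description_to_table_py
    parse_description_to_table_py_alt
  cases description with
  | none => simp [pvScanB, pvFlush]
  | some s =>
    show (if s = "" then [] else (PySem.Chars.splitOn s.toList ['.']).foldl pvRowA [])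
      = pvScanB s.toList [] none []
    by_cases hs : s = ""
    · subst hs
      simp [pvScanB, pvFlush]
    · rw [if_neg hs, splitOn_eq, foldl_pvRowA,
        scan_eq s.toList [] none [] ⟨by simp, by simp⟩,
        show pvRecon none [] ++ s.toList = s.toList from rfl]
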